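-- pv_equiv track=rewrite | github.com/hoangIT1/Data-stucture-and-algorithm | matrix mutiplycation to find n(th) fibonacci number.py | fibPow
-- ===== SOURCE A (Python) =====
-- def fibPow(M,expo):
--     if (expo == 0 or expo == 1):        #Base Case
--         return M
--     elif (expo % 2 == 0):
--         return fibPow(matrix_multiplication(M, M), expo//2)     # if expo is even,  M^(n/2) * M^(n/2) = M
--     elif (expo % 2 != 0):
--         R = fibPow(matrix_multiplication(M, M), expo//2)        # if expo is odd,  M^2 * M = M^3
--         return matrix_multiplication(M,R)
--
-- def matrix_multiplication(A, B):
--     u = A[0][0] * B[0][0] + A[0][1] * B[1][0]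
--
--     v = A[0][0] * B[0][1] + A[0][1] * B[1][1]
--
--     w = A[1][0] * B[0][0] + A[1][1] * B[1][0]
--
--     x = A[1][0] * B[0][1] + A[1][1] * B[1][1]
--
--     return [[u, v], [w, x]]
-- ===== SOURCE B (Python) =====
-- def fibPow(M, expo):
--     if expo == 0 or expo == 1:
--         return M
--     result = None
--     base = M
--     e = expo
--     while e > 0:
--         if e % 2 == 1:
--             result = base if result is None else matrix_multiplication(result, base)
--         e //= 2
--         if e > 0:
--             base = matrix_multiplication(base, base)
--     return result
--
-- def matrix_multiplication(A, B):
--     u = A[0][0] * B[0][0] + A[0][1] * B[1][0]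
--     v = A[0][0] * B[0][1] + A[0][1] * B[1][1]
--     w = A[1][0] * B[0][0] + A[1][1] * B[1][0]
--     x = A[1][0] * B[0][1] + A[1][1] * B[1][1]
--     return [[u, v], [w, x]]
-- ===== Notes on version B (the rewrite author's own statement) =====
-- stated objective: alternative
-- what changed: Recursive exponentiation-by-squaring replaced by an iterative bottom-up bit loop maintaining (result, base), keeping the same quirky expo<=1 base guard and never multiplying by an identity matrix.
import Mathlib
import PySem

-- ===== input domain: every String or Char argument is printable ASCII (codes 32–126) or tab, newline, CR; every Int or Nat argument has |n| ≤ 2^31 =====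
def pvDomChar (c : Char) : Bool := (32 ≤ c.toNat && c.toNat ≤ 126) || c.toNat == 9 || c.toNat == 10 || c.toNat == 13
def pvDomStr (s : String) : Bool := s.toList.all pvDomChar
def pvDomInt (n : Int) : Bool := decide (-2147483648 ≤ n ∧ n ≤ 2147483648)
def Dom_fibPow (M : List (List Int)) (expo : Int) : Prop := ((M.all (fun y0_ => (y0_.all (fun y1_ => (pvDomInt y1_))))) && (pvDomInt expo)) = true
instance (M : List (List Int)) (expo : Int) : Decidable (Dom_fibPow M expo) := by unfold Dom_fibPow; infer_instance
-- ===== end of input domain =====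

-- B changes the decomposition only: the same exponentiation-by-squaring is done by an
-- iterative bit loop over expo instead of A's recursion; same cost, same values.

-- ===== PORT A =====
-- matrix_multiplication: the Python indices are the literal, nonnegative 0 and 1, in range
-- on every input Pre_fibPow admits, so `List.getD` is exact there (Python raises IndexError
-- on the inputs Pre_fibPow excludes).
def pvMM (A B : List (List Int)) : List (List Int) :=
  let a00 := (A.getD 0 []).getD 0 0
  let a01 := (A.getD 0 []).getD 1 0
  let a10 := (A.getD 1 []).getD 0 0
  let a11 := (A.getD 1 []).getD 1 0
  let b00 := (B.getD 0 []).getD 0 0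
  let b01 := (B.getD 0 []).getD 1 0
  let b10 := (B.getD 1 []).getD 0 0
  let b11 := (B.getD 1 []).getD 1 0
  [[a00 * b00 + a01 * b10, a00 * b01 + a01 * b11],
   [a10 * b00 + a11 * b10, a10 * b01 + a11 * b11]]

-- A's recursion, fueled by expo.toNat (enough for every expo ≥ 0; Python never terminates
-- for expo < 0, which Pre_fibPow excludes, so the fuel-exhausted branch is unreachable on Pre_).
def pvGoA : Nat → List (List Int) → Int → List (List Int)
  | f, M, e =>
    if e = 0 ∨ e = 1 then M
    else
      match f with
      | 0 => M
      | f + 1 =>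
        if PySem.Int.mod e 2 = 0 then pvGoA f (pvMM M M) (PySem.Int.floordiv e 2)
        else pvMM M (pvGoA f (pvMM M M) (PySem.Int.floordiv e 2))

def fibPow (M : List (List Int)) (expo : Int) : List (List Int) :=
  pvGoA expo.toNat M expo

-- ===== PORT B =====
-- B's while loop, fueled by e.toNat (the loop halves e, so this fuel is never exhausted for
-- e ≥ 0; on the Pre_-excluded negative expo Python B returns None, the port returns M).
def pvGoB : Nat → Option (List (List Int)) → List (List Int) → Int → List (List Int)
  | 0, r, base, _ => r.getD base
  | f + 1, r, base, e =>
    if e ≤ 0 then r.getD base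
    else
      let r' := if PySem.Int.mod e 2 = 1 then
                  some (match r with | none => base | some x => pvMM x base)
                else r
      let e' := PySem.Int.floordiv e 2
      let base' := if 0 < e' then pvMM base base else base
      pvGoB f r' base' e'

def fibPow_alt (M : List (List Int)) (expo : Int) : List (List Int) :=
  if expo = 0 ∨ expo = 1 then M
  else pvGoB expo.toNat none M expo

-- ===== PRECONDITION & SPEC =====
-- Pre_ excludes expo < 0 (A recurses forever: RecursionError) and, when expo ≥ 2, matrices
-- without the 2×2 top-left block that matrix_multiplication indexes (IndexError).
def Pre_fibPow (M : List (List Int)) (expo : Int) : Prop :=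
  0 ≤ expo ∧ (expo ≤ 1 ∨
    (2 ≤ M.length ∧ 2 ≤ (M.getD 0 []).length ∧ 2 ≤ (M.getD 1 []).length))
instance (M : List (List Int)) (expo : Int) : Decidable (Pre_fibPow M expo) := by
  unfold Pre_fibPow; infer_instance

def pvWitness_fibPow : List (List Int) × Int := ([[1, 1], [1, 0]], 5)

def Spec_fibPow (M : List (List Int)) (expo : Int) (out : List (List Int)) : Prop := out = fibPow_alt M expo
instance (M : List (List Int)) (expo : Int) (out : List (List Int)) : Decidable (Spec_fibPow M expo out) := by unfold Spec_fibPow; infer_instance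

-- ===== CLAIM (what is proved, stated in full; the proofs are below) =====
def Claim_equal_fibPow : Prop := ∀ (M : List (List Int)) (expo : Int), Dom_fibPow M expo → Pre_fibPow M expo → Spec_fibPow M expo (fibPow M expo)

-- ===== LEMMAS AND PROOFS =====

-- 2×2 integer matrix product is associative (pvMM reads only the top-left 2×2 and always
-- returns a full 2×2 literal, so this holds for all lists).
theorem pvMM_assoc (a b c : List (List Int)) :
    pvMM (pvMM a b) c = pvMM a (pvMM b c) := by
  simp only [pvMM, List.getD]
  norm_num
  refine ⟨⟨by ring, by ring⟩, by ring, by ring⟩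

theorem pvGoB_exit (f : Nat) (r : Option (List (List Int))) (base : List (List Int))
    (e : Int) (he : e ≤ 0) : pvGoB f r base e = r.getD base := by
  cases f with
  | zero => rfl
  | succ f => simp [pvGoB, he]

theorem pvKey (n : Nat) : ∀ (e : Int), 1 ≤ e → e.toNat = n →
    ∀ (f₁ f₂ : Nat), n ≤ f₁ → n ≤ f₂ → ∀ (base : List (List Int)),
    pvGoB f₁ none base e = pvGoA f₂ base e ∧
    ∀ r, pvGoB f₁ (some r) base e = pvMM r (pvGoA f₂ base e) := by
  induction n using Nat.strong_induction_on with
  | _ n ih =>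
    intro e he hn f₁ f₂ hf₁ hf₂ base
    have hmod : PySem.Int.mod e 2 = e % 2 := PySem.Int.mod_eq_emod_of_pos (by omega)
    have hdiv : PySem.Int.floordiv e 2 = e / 2 := PySem.Int.floordiv_eq_ediv_of_pos (by omega)
    obtain ⟨f₁, rfl⟩ : ∃ g, f₁ = g + 1 := ⟨f₁ - 1, by omega⟩
    obtain ⟨f₂, rfl⟩ : ∃ g, f₂ = g + 1 := ⟨f₂ - 1, by omega⟩
    by_cases h1 : e = 1
    · subst h1
      constructor
      · simp [pvGoB, pvGoA, pvGoB_exit]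
      · intro r
        simp [pvGoB, pvGoA, pvGoB_exit]
    · -- e ≥ 2
      have he2 : 2 ≤ e := by omega
      have hd1 : 1 ≤ e / 2 := by omega
      have hdn : (e / 2).toNat = n / 2 := by omega
      have hlt : n / 2 < n := by omega
      have hle₁ : n / 2 ≤ f₁ := by omega
      have hle₂ : n / 2 ≤ f₂ := by omega
      have ihh := ih (n / 2) hlt (e / 2) hd1 hdn f₁ f₂ hle₁ hle₂
      by_cases hev : e % 2 = 0
      · constructor
        · simp only [pvGoA, pvGoB, hmod, hdiv, hev]
          simp only [show ¬(e = 0 ∨ e = 1) from by omega, if_false,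
            show ¬ e ≤ 0 from by omega, if_false,
            if_pos (by omega : (0:Int) < e / 2)]
          exact (ihh (pvMM base base)).1
        · intro r
          simp only [pvGoA, pvGoB, hmod, hdiv, hev]
          simp only [show ¬(e = 0 ∨ e = 1) from by omega, if_false,
            show ¬ e ≤ 0 from by omega, if_false,
            if_pos (by omega : (0:Int) < e / 2)]
          exact (ihh (pvMM base base)).2 r
      · have hodd : e % 2 = 1 := by omega
        constructor
        · simp only [pvGoA, pvGoB, hmod, hdiv]
          simp only [show ¬(e = 0 ∨ e = 1) from by omega, if_false,
            show ¬ e % 2 = 0 from hev, if_false,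
            show ¬ e ≤ 0 from by omega, if_false, if_pos hodd,
            if_pos (by omega : (0:Int) < e / 2)]
          exact (ihh (pvMM base base)).2 base
        · intro r
          simp only [pvGoA, pvGoB, hmod, hdiv]
          simp only [show ¬(e = 0 ∨ e = 1) from by omega, if_false,
            show ¬ e % 2 = 0 from hev, if_false,
            show ¬ e ≤ 0 from by omega, if_false, if_pos hodd,
            if_pos (by omega : (0:Int) < e / 2)]
          rw [(ihh (pvMM base base)).2 (pvMM r base), pvMM_assoc]

-- ===== VERDICT (by name: the statement is the Claim_ definition above) =====
theorem fibPow_spec : Claim_equal_fibPow := by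
  intro M expo _ hPre
  unfold Spec_fibPow fibPow fibPow_alt
  by_cases hb : expo = 0 ∨ expo = 1
  · rw [if_pos hb]
    rcases hb with rfl | rfl <;> rfl
  · rw [if_neg hb]
    have h1 : 1 ≤ expo := by rcases hPre with ⟨h0, _⟩; omega
    exact ((pvKey expo.toNat expo h1 rfl expo.toNat expo.toNat le_rfl le_rfl M).1).symm
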